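-- pv_equiv track=rewrite | github.com/haolunc/ARC-RL | reference_solutions/solutions/ef135b50.py | transform
-- ===== SOURCE A (Python) =====
-- def transform(grid):
--
--     out = [row[:] for row in grid]
--     h = len(out)
--     if h == 0:
--         return out
--     w = len(out[0])
--
--     for i in range(1, h - 1):
--
--         twos = [j for j in range(w) if out[i][j] == 2]
--         if len(twos) >= 2:
--             left = min(twos)
--             right = max(twos)
--
--             for j in range(left + 1, right):
--                 if out[i][j] == 0:
--                     out[i][j] = 9
--     return out
-- ===== SOURCE B (Python) =====
-- def transform(grid):
--     if not grid:
--         return []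
--     w = len(grid[0])
--     h = len(grid)
--     out = []
--     for i, row in enumerate(grid):
--         new = list(row)
--         if 0 < i < h - 1:
--             started = False
--             pending = []
--             for j in range(w):
--                 v = new[j]
--                 if v == 2:
--                     if started:
--                         for k in pending:
--                             new[k] = 9
--                     started = True
--                     pending = []
--                 elif v == 0 and started:
--                     pending.append(j)
--         out.append(new)
--     return out
-- ===== Notes on version B (the rewrite author's own statement) =====
-- stated objective: alternative
-- what changed: Replaces the per-row two-pass strategy (collect all columns holding 2, take min/max, then re-scan and fill the open interval) by a single left-to-right state-machine pass per row that keeps a 'started' flag and a pending list of zero columns, flushing the pending zeros to 9 each time another 2 is met.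
import Mathlib
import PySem

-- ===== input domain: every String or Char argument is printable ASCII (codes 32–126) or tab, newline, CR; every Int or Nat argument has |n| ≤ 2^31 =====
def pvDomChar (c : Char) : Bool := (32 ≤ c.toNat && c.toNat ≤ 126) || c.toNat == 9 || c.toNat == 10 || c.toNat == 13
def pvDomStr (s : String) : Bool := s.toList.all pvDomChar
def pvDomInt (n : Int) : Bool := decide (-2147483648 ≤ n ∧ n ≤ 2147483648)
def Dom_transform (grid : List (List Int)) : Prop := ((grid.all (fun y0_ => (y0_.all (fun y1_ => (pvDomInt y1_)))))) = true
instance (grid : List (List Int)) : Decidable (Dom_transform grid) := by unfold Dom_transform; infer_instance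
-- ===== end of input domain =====

-- B replaces A's per-row two-pass plan (collect the columns holding 2, take min/max, re-scan
-- and fill the open interval) by a single left-to-right pass per row with a 'started' flag and
-- a pending list of zero columns flushed to 9 whenever another 2 appears (objective: alternative).

-- ===== PORT A =====
-- one fill step of A's inner 'for j in range(left+1, right)' loop
def pvFillStep (r : List Int) (j : Nat) : List Int :=
  if r.getD j 0 == 0 then r.set j 9 else r

-- the body A applies to row i: twos, min/max, fill the open interval
def pvFillRow (w : Nat) (row : List Int) : List Int :=
  let twos := (List.range w).filter (fun j => row.getD j 0 == 2)
  if 2 ≤ twos.length then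
    let left := (PySem.List.min? twos (fun x => x)).getD 0
    let right := (PySem.List.max? twos (fun x => x)).getD 0
    (List.range' (left + 1) (right - (left + 1))).foldl pvFillStep row
  else row

-- 'out = [row[:] for row in grid]' is the identity on values, so out := grid
def transform (grid : List (List Int)) : List (List Int) :=
  let out := grid
  let h := out.length
  if h = 0 then out
  else
    let w := (out.headD []).length
    -- range(1, h-1) = List.range' 1 (h-2); out[i] is rebuilt and written back
    (List.range' 1 (h - 2)).foldl (fun out i => out.set i (pvFillRow w (out.getD i []))) out

-- ===== PORT B =====
-- 'for k in pending: new[k] = 9'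
def pvFlush (nw : List Int) (pending : List Nat) : List Int :=
  pending.foldl (fun a k => a.set k 9) nw

-- one step of B's scan: state = (new, started, pending)
def pvScanStep (st : List Int × Bool × List Nat) (j : Nat) : List Int × Bool × List Nat :=
  let v := st.1.getD j 0
  if v == 2 then
    ((if st.2.1 then pvFlush st.1 st.2.2 else st.1), true, ([] : List Nat))
  else if v == 0 && st.2.1 then (st.1, st.2.1, st.2.2 ++ [j])
  else st

-- B's single pass over one interior row
def pvScanRow (w : Nat) (row : List Int) : List Int :=
  ((List.range w).foldl pvScanStep (row, false, ([] : List Nat))).1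

def transform_alt (grid : List (List Int)) : List (List Int) :=
  match grid with
  | [] => []
  | r0 :: _ =>
    let w := r0.length
    let h := grid.length
    -- 'for i, row in enumerate(grid): out.append(...)'
    grid.zipIdx.foldl
      (fun out p => out ++ [if 0 < p.2 ∧ p.2 < h - 1 then pvScanRow w p.1 else p.1]) []

-- ===== PRECONDITION & SPEC =====
-- Pre_ excludes exactly the ragged grids on which the Python A raises IndexError (an interior
-- row shorter than the first row); Python B raises there too, nothing returned is excluded.
def Pre_transform (grid : List (List Int)) : Prop :=
  ∀ row ∈ grid.tail.dropLast, (grid.headD []).length ≤ row.length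
instance (grid : List (List Int)) : Decidable (Pre_transform grid) := by
  unfold Pre_transform; infer_instance

def pvWitness_transform : List (List Int) := [[2, 0, 2], [2, 0, 1], [0, 2, 2]]

def Spec_transform (grid : List (List Int)) (out : List (List Int)) : Prop := out = transform_alt grid
instance (grid : List (List Int)) (out : List (List Int)) : Decidable (Spec_transform grid out) := by unfold Spec_transform; infer_instance

-- ===== CLAIM (what is proved, stated in full; the proofs are below) =====
def Claim_equal_transform : Prop := ∀ (grid : List (List Int)), Dom_transform grid → Pre_transform grid → Spec_transform grid (transform grid)

-- ===== LEMMAS AND PROOFS =====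

-- `j` is a zero strictly between two 2-columns of the first `n` columns
def pvFlushP (row : List Int) (n j : Nat) : Prop :=
  row.getD j 0 = 0 ∧ (∃ p, p < j ∧ row.getD p 0 = 2) ∧ (∃ q, j < q ∧ q < n ∧ row.getD q 0 = 2)

-- `j` is a zero after some 2 but with no further 2 among the first `n` columns
def pvPendP (row : List Int) (n j : Nat) : Prop :=
  j < n ∧ row.getD j 0 = 0 ∧ (∃ p, p < j ∧ row.getD p 0 = 2) ∧
    (∀ q, j < q → q < n → row.getD q 0 ≠ 2)

theorem pvGetD_set_ne (b : List Int) (i j : Nat) (v : Int) (h : i ≠ j) :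
    (b.set i v).getD j 0 = b.getD j 0 := by
  simp [List.getD, List.getElem?_set_ne h]

theorem pvGetD_pvFlush_not_mem (l : List Nat) (b : List Int) (j : Nat) (h : j ∉ l) :
    (pvFlush b l).getD j 0 = b.getD j 0 := by
  induction l generalizing b with
  | nil => rfl
  | cons k t ih =>
    simp only [List.mem_cons, not_or] at h
    simp only [pvFlush, List.foldl_cons] at *
    rw [ih (b.set k 9) h.2, pvGetD_set_ne _ _ _ _ (fun hk => h.1 hk.symm)]

theorem pvFlush_perm (b : List Int) (l l' : List Nat) (h : l.Perm l') :
    pvFlush b l = pvFlush b l' := by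
  unfold pvFlush
  haveI : RightCommutative (fun (a : List Int) (k : Nat) => a.set k 9) := ⟨by
    intro a i k
    by_cases hik : i = k
    · subst hik; rfl
    · exact List.set_comm _ _ hik⟩
  exact h.foldl_eq b

theorem pvFill_eq_flush (l : List Nat) (b orig : List Int) (hnd : l.Nodup)
    (hsame : ∀ j ∈ l, b.getD j 0 = orig.getD j 0) :
    l.foldl pvFillStep b = pvFlush b (l.filter (fun j => orig.getD j 0 == 0)) := by
  induction l generalizing b with
  | nil => rfl
  | cons j t ih =>
    have hj : b.getD j 0 = orig.getD j 0 := hsame j List.mem_cons_self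
    have hjt : j ∉ t := (List.nodup_cons.mp hnd).1
    have hstep : ∀ i ∈ t, ∀ v : Int, (b.set j v).getD i 0 = b.getD i 0 := by
      intro i hi v
      exact pvGetD_set_ne _ _ _ _ (fun he => hjt (he.symm ▸ hi))
    by_cases h0 : orig.getD j 0 = 0
    · have hcond : (orig.getD j 0 == 0) = true := beq_iff_eq.mpr h0
      simp only [List.foldl_cons, pvFillStep, hj, hcond, if_true, List.filter_cons,
        pvFlush, List.foldl_cons]
      exact ih (b.set j 9) hnd.of_cons
        (fun i hi => by rw [hstep i hi 9]; exact hsame i (List.mem_cons_of_mem _ hi))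
    · have hcond : (orig.getD j 0 == 0) = false := beq_false_of_ne h0
      simp only [List.foldl_cons, pvFillStep, hj, hcond, if_false, List.filter_cons,
        Bool.false_eq_true]
      exact ih b hnd.of_cons (fun i hi => hsame i (List.mem_cons_of_mem _ hi))

-- the invariant of B's single pass over a row
theorem pvScan_inv (row : List Int) (n : Nat) :
    ∃ L P : List Nat,
      (List.range n).foldl pvScanStep (row, false, ([] : List Nat)) =
        (pvFlush row L, (List.range n).any (fun p => row.getD p 0 == 2), P) ∧
      L.Nodup ∧ P.Nodup ∧
      (∀ j, j ∈ L ↔ pvFlushP row n j) ∧ (∀ j, j ∈ P ↔ pvPendP row n j) := by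
  induction n with
  | zero =>
    refine ⟨[], [], rfl, List.nodup_nil, List.nodup_nil, ?_, ?_⟩
    · intro j
      simp only [List.not_mem_nil, false_iff, pvFlushP]
      rintro ⟨-, -, q, -, hq, -⟩
      omega
    · intro j
      simp only [List.not_mem_nil, false_iff, pvPendP]
      rintro ⟨hj, -⟩
      omega
  | succ n ih =>
    obtain ⟨L, P, hfold, hLnd, hPnd, hL, hP⟩ := ih
    have hLlt : ∀ j ∈ L, j < n := by
      intro j hj; obtain ⟨-, -, q, hq1, hq2, -⟩ := (hL j).mp hj; omega
    have hPlt : ∀ j ∈ P, j < n := by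
      intro j hj; exact ((hP j).mp hj).1
    have hnL : n ∉ L := fun h => absurd (hLlt n h) (lt_irrefl n)
    have hv : (pvFlush row L).getD n 0 = row.getD n 0 := pvGetD_pvFlush_not_mem L row n hnL
    rw [List.range_succ, List.foldl_append, hfold, List.foldl_cons, List.foldl_nil]
    by_cases hv2 : row.getD n 0 = 2
    · -- current cell is a 2
      have hany : ((List.range (n + 1)).any (fun p => row.getD p 0 == 2)) = true := by
        rw [List.range_succ, List.any_append, List.any_cons, List.any_nil,
          beq_iff_eq.mpr hv2]
        simp
      by_cases hst : ((List.range n).any (fun p => row.getD p 0 == 2)) = true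
      · -- started: flush pending
        have hex : ∃ p, p < n ∧ row.getD p 0 = 2 := by
          simp only [List.any_eq_true, List.mem_range, beq_iff_eq] at hst
          exact hst
        have hdisj : ∀ j ∈ L, j ∈ P → False := by
          intro j hjL hjP
          obtain ⟨-, -, q, hq1, hq2, hq3⟩ := (hL j).mp hjL
          exact ((hP j).mp hjP).2.2.2 q hq1 hq2 hq3
        refine ⟨L ++ P, [], ?_, List.Nodup.append hLnd hPnd hdisj, List.nodup_nil, ?_, ?_⟩
        · rw [← List.range_succ, hany]
          simp only [pvScanStep, hv, hv2, beq_self_eq_true, if_true, hst]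
          simp [pvFlush, List.foldl_append]
        · intro j
          rw [List.mem_append, hL j, hP j]
          constructor
          · rintro (⟨h0, hp, q, hq1, hq2, hq3⟩ | ⟨hjn, h0, hp, -⟩)
            · exact ⟨h0, hp, q, hq1, by omega, hq3⟩
            · exact ⟨h0, hp, n, hjn, by omega, hv2⟩
          · rintro ⟨h0, hp, q, hq1, hq2, hq3⟩
            by_cases hq : q < n
            · exact Or.inl ⟨h0, hp, q, hq1, hq, hq3⟩
            · have hqn : q = n := by omega
              by_cases hmid : ∃ q', j < q' ∧ q' < n ∧ row.getD q' 0 = 2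
              · exact Or.inl ⟨h0, hp, hmid⟩
              · push_neg at hmid
                exact Or.inr ⟨by omega, h0, hp, fun q' h1 h2 => hmid q' h1 h2⟩
        · intro j
          simp only [List.not_mem_nil, false_iff, pvPendP, not_and]
          intro hjn h0 hp
          push_neg
          by_cases hj : j < n
          · exact ⟨n, hj, by omega, hv2⟩
          · have : j = n := by omega
            subst this
            rw [h0] at hv2; cases hv2
      · -- not started yet: nothing flushed so far, just mark started
        have hnone : ∀ p, p < n → row.getD p 0 ≠ 2 := by
          intro p hp hpe
          exact hst (List.any_eq_true.mpr ⟨p, List.mem_range.mpr hp, beq_iff_eq.mpr hpe⟩)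
        have hLe : L = [] := by
          apply List.eq_nil_iff_forall_not_mem.mpr
          intro j hj
          obtain ⟨-, ⟨p, hp1, hp2⟩, q, hq1, hq2, -⟩ := (hL j).mp hj
          exact hnone p (by omega) hp2
        subst hLe
        refine ⟨[], [], ?_, List.nodup_nil, List.nodup_nil, ?_, ?_⟩
        · rw [← List.range_succ, hany]
          simp only [pvScanStep, hv, hv2, beq_self_eq_true, if_true, hst,
            Bool.false_eq_true, if_false]
        · intro j
          simp only [List.not_mem_nil, false_iff, pvFlushP, not_and]
          rintro h0 ⟨p, hp1, hp2⟩ ⟨q, hq1, hq2, hq3⟩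
          exact hnone p (by omega) hp2
        · intro j
          simp only [List.not_mem_nil, false_iff, pvPendP, not_and]
          rintro hjn h0 ⟨p, hp1, hp2⟩
          exact absurd hp2 (hnone p (by omega))
    · -- current cell is not a 2
      have hb2 : (row.getD n 0 == 2) = false := beq_false_of_ne hv2
      have hany' : ((List.range (n + 1)).any (fun p => row.getD p 0 == 2)) =
          ((List.range n).any (fun p => row.getD p 0 == 2)) := by
        rw [List.range_succ, List.any_append, List.any_cons, List.any_nil, hb2]
        simp
      by_cases hv0 : row.getD n 0 = 0 ∧ ((List.range n).any (fun p => row.getD p 0 == 2)) = true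
      · -- zero after a 2: append to pending
        obtain ⟨h0, hst⟩ := hv0
        have hex : ∃ p, p < n ∧ row.getD p 0 = 2 := by
          simp only [List.any_eq_true, List.mem_range, beq_iff_eq] at hst
          exact hst
        refine ⟨L, P ++ [n], ?_, hLnd, ?_, ?_, ?_⟩
        · rw [← List.range_succ, hany']
          simp only [pvScanStep, hv, h0, hst]
          simp
        · refine List.Nodup.append hPnd (List.nodup_singleton n) ?_
          intro j hjP hjn
          simp only [List.mem_singleton] at hjn
          exact absurd (hPlt j hjP) (by omega)
        · intro j
          rw [hL j]
          constructor
          · rintro ⟨ha, hp, q, hq1, hq2, hq3⟩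
            exact ⟨ha, hp, q, hq1, by omega, hq3⟩
          · rintro ⟨ha, hp, q, hq1, hq2, hq3⟩
            have : q ≠ n := fun he => hv2 (he ▸ hq3)
            exact ⟨ha, hp, q, hq1, by omega, hq3⟩
        · intro j
          rw [List.mem_append, hP j]
          simp only [List.mem_singleton]
          constructor
          · rintro (⟨hjn, ha, hp, hq⟩ | he)
            · refine ⟨by omega, ha, hp, fun q h1 h2 => ?_⟩
              by_cases hqn : q = n
              · subst hqn; rw [h0]; omega
              · exact hq q h1 (by omega)
            · subst he
              exact ⟨by omega, h0, hex.imp (fun p hp => ⟨hp.1, hp.2⟩), fun q h1 h2 => by omega⟩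
          · rintro ⟨hjn, ha, hp, hq⟩
            by_cases hje : j = n
            · exact Or.inr hje
            · have hjlt : j < n := by omega
              exact Or.inl ⟨hjlt, ha, hp, fun q h1 h2 => hq q h1 (by omega)⟩
      · -- nothing happens
        have hcond : (row.getD n 0 == 0 && (List.range n).any (fun p => row.getD p 0 == 2)) = false := by
          by_cases h : ((List.range n).any (fun p => row.getD p 0 == 2)) = true
          · rw [h, Bool.and_true, beq_false_of_ne (fun he => hv0 ⟨he, h⟩)]
          · rw [Bool.not_eq_true] at h
            rw [h, Bool.and_false]
        refine ⟨L, P, ?_, hLnd, hPnd, ?_, ?_⟩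
        · rw [← List.range_succ, hany']
          simp only [pvScanStep, hv, hb2, Bool.false_eq_true, if_false, hcond]
        · intro j
          rw [hL j]
          constructor
          · rintro ⟨ha, hp, q, hq1, hq2, hq3⟩
            exact ⟨ha, hp, q, hq1, by omega, hq3⟩
          · rintro ⟨ha, hp, q, hq1, hq2, hq3⟩
            have : q ≠ n := fun he => hv2 (he ▸ hq3)
            exact ⟨ha, hp, q, hq1, by omega, hq3⟩
        · intro j
          rw [hP j]
          constructor
          · rintro ⟨hjn, ha, hp, hq⟩
            refine ⟨by omega, ha, hp, fun q h1 h2 => ?_⟩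
            by_cases hqn : q = n
            · subst hqn; exact hv2
            · exact hq q h1 (by omega)
          · rintro ⟨hjn, ha, hp, hq⟩
            have hje : j ≠ n := by
              intro he
              obtain ⟨p, hp1, hp2⟩ := hp
              have hany2 : ((List.range n).any (fun p => row.getD p 0 == 2)) = true :=
                List.any_eq_true.mpr ⟨p, List.mem_range.mpr (by omega), beq_iff_eq.mpr hp2⟩
              exact hv0 ⟨he ▸ ha, hany2⟩
            exact ⟨by omega, ha, hp, fun q h1 h2 => hq q h1 (by omega)⟩

-- helper: a nodup list whose members are all equal has at most one element
theorem pvNodup_all_eq {l : List Nat} {m : Nat} (hnd : l.Nodup) (hall : ∀ x ∈ l, x = m) :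
    l.length ≤ 1 := by
  match l with
  | [] => simp
  | [x] => simp
  | x :: y :: t =>
    have hx : x = m := hall x List.mem_cons_self
    have hy : y = m := hall y (List.mem_cons_of_mem _ List.mem_cons_self)
    rw [List.nodup_cons] at hnd
    exact absurd (by rw [hx, ← hy]; exact List.mem_cons_self) hnd.1

-- helper: a list with two distinct members has length ≥ 2
theorem pvTwo_mem_length {l : List Nat} {a b : Nat} (ha : a ∈ l) (hb : b ∈ l) (hne : a ≠ b) :
    2 ≤ l.length := by
  match l with
  | [] => cases ha
  | [x] =>
    simp at ha hb
    exact absurd (ha.trans hb.symm) hne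
  | x :: y :: t => simp only [List.length_cons]; omega

-- the row-level heart: A's fill equals B's scan on any row
theorem pvRow_eq (w : Nat) (row : List Int) : pvFillRow w row = pvScanRow w row := by
  obtain ⟨L, P, hfold, hLnd, hPnd, hL, hP⟩ := pvScan_inv row w
  have hscan : pvScanRow w row = pvFlush row L := by
    rw [pvScanRow, hfold]
  set twos := (List.range w).filter (fun j => row.getD j 0 == 2) with htwos
  have htnd : twos.Nodup := (List.nodup_range).filter _
  have hmem : ∀ j, j ∈ twos ↔ j < w ∧ row.getD j 0 = 2 := by
    intro j
    rw [htwos, List.mem_filter, List.mem_range, beq_iff_eq]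
  rw [pvFillRow]
  by_cases h2 : 2 ≤ twos.length
  · simp only [← htwos, h2, if_true]
    have hne : twos ≠ [] := by
      intro he; rw [he] at h2; simp at h2
    obtain ⟨m, hm⟩ : ∃ m, PySem.List.min? twos (fun x => x) = some m := by
      cases hmin : PySem.List.min? twos (fun x => x) with
      | none => exact absurd ((PySem.List.min?_eq_none_iff _ _).mp hmin) hne
      | some m => exact ⟨m, rfl⟩
    obtain ⟨M, hM⟩ : ∃ M, PySem.List.max? twos (fun x => x) = some M := by
      cases hmax : PySem.List.max? twos (fun x => x) with
      | none => exact absurd ((PySem.List.max?_eq_none_iff _ _).mp hmax) hne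
      | some M => exact ⟨M, rfl⟩
    have hmmem : m ∈ twos := PySem.List.min?_mem hm
    have hMmem : M ∈ twos := PySem.List.max?_mem hM
    have hmin : ∀ y ∈ twos, m ≤ y := fun y hy => PySem.List.min?_isMin hm y hy
    have hmax : ∀ y ∈ twos, y ≤ M := fun y hy => PySem.List.max?_isMax hM y hy
    have hmM : m < M := by
      rcases Nat.lt_or_ge m M with h | h
      · exact h
      · exfalso
        have hem : m = M := le_antisymm (hmin M hMmem) h
        have hall : ∀ x ∈ twos, x = m := by
          intro x hx
          have h1 := hmin x hx
          have h2 := hmax x hx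
          omega
        have hlen : twos.length ≤ 1 := pvNodup_all_eq htnd hall
        omega
    rw [hm, hM]
    simp only [Option.getD_some]
    have hfill := pvFill_eq_flush (List.range' (m + 1) (M - (m + 1))) row row
      List.nodup_range' (fun j _ => rfl)
    rw [hfill, hscan]
    apply pvFlush_perm
    rw [List.perm_ext_iff_of_nodup (List.Nodup.filter _ List.nodup_range') hLnd]
    intro j
    rw [List.mem_filter, List.mem_range'_1, hL j, beq_iff_eq]
    have hMw : M < w := ((hmem M).mp hMmem).1
    have hm2 : row.getD m 0 = 2 := ((hmem m).mp hmmem).2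
    have hM2 : row.getD M 0 = 2 := ((hmem M).mp hMmem).2
    constructor
    · rintro ⟨⟨h1, h2'⟩, h0⟩
      have hjM : j < M := by omega
      exact ⟨h0, ⟨m, by omega, hm2⟩, M, hjM, hMw, hM2⟩
    · rintro ⟨h0, ⟨p, hp1, hp2⟩, q, hq1, hq2, hq3⟩
      have hptw : p ∈ twos := (hmem p).mpr ⟨by omega, hp2⟩
      have hqtw : q ∈ twos := (hmem q).mpr ⟨hq2, hq3⟩
      have h5 := hmin p hptw
      have h6 := hmax q hqtw
      refine ⟨⟨by omega, by omega⟩, h0⟩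
  · simp only [← htwos, h2, if_false]
    have hLe : L = [] := by
      apply List.eq_nil_iff_forall_not_mem.mpr
      intro j hj
      obtain ⟨-, ⟨p, hp1, hp2⟩, q, hq1, hq2, hq3⟩ := (hL j).mp hj
      have hptw : p ∈ twos := (hmem p).mpr ⟨by omega, hp2⟩
      have hqtw : q ∈ twos := (hmem q).mpr ⟨hq2, hq3⟩
      exact h2 (pvTwo_mem_length hptw hqtw (by omega))
    rw [hscan, hLe]
    rfl

-- getD-stable lemmas for List (List Int) updates
theorem pvGetDL_set_ne (xs : List (List Int)) (i k : Nat) (v : List Int) (h : i ≠ k) :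
    (xs.set i v).getD k [] = xs.getD k [] := by
  simp [List.getD, List.getElem?_set_ne h]

theorem pvGetDL_set_self (xs : List (List Int)) (k : Nat) (v : List Int) (h : k < xs.length) :
    (xs.set k v).getD k [] = v := by
  simp [List.getD, List.getElem?_set_self h]

-- A's grid fold, pointwise: each listed index is rewritten from the original grid once
theorem pvFoldSet_getD (g : List Int → List Int) (l : List Nat) :
    ∀ xs : List (List Int), l.Nodup →
      ((l.foldl (fun out i => out.set i (g (out.getD i []))) xs).length = xs.length ∧
       ∀ k, (l.foldl (fun out i => out.set i (g (out.getD i []))) xs).getD k [] =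
         if k ∈ l ∧ k < xs.length then g (xs.getD k []) else xs.getD k []) := by
  induction l with
  | nil =>
    intro xs _
    exact ⟨rfl, fun k => by simp⟩
  | cons i t ih =>
    intro xs hnd
    have hit : i ∉ t := (List.nodup_cons.mp hnd).1
    obtain ⟨ihlen, ihget⟩ := ih (xs.set i (g (xs.getD i []))) hnd.of_cons
    simp only [List.foldl_cons]
    constructor
    · rw [ihlen, List.length_set]
    · intro k
      rw [ihget k, List.length_set]
      by_cases hkt : k ∈ t
      · have hki : i ≠ k := fun he => hit (he ▸ hkt)
        by_cases hkl : k < xs.length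
        · rw [if_pos ⟨hkt, hkl⟩, if_pos ⟨List.mem_cons_of_mem _ hkt, hkl⟩,
            pvGetDL_set_ne _ _ _ _ hki]
        · rw [if_neg (fun hc => hkl hc.2), if_neg (fun hc => hkl hc.2),
            pvGetDL_set_ne _ _ _ _ hki]
      · by_cases hki : k = i
        · subst hki
          rw [if_neg (fun hc => hkt hc.1)]
          by_cases hkl : k < xs.length
          · rw [if_pos ⟨List.mem_cons_self, hkl⟩, pvGetDL_set_self _ _ _ hkl]
          · rw [List.set_eq_of_length_le (by omega), if_neg (fun hc => hkl hc.2)]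
        · have hki' : i ≠ k := fun he => hki he.symm
          rw [if_neg (fun hc => hkt hc.1), pvGetDL_set_ne _ _ _ _ hki',
            if_neg (fun hc => (List.mem_cons.mp hc.1).elim (fun he => hki he) hkt)]

-- ===== VERDICT (by name: the statement is the Claim_ definition above) =====
theorem transform_spec : Claim_equal_transform := by
  intro grid _ _
  unfold Spec_transform
  match grid with
  | [] => rfl
  | r0 :: rest =>
    set grid := r0 :: rest with hgrid
    have hh : grid.length ≠ 0 := by simp [hgrid]
    set h := grid.length with hlen
    set w := r0.length with hw
    -- B's side: the append fold is a map over zipIdx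
    have hB : transform_alt grid =
        grid.zipIdx.map (fun p => if 0 < p.2 ∧ p.2 < h - 1 then pvScanRow w p.1 else p.1) := by
      rw [hgrid, transform_alt]
      exact PySem.List.foldl_append_singleton_eq_map _ _ _
    -- A's side: the set fold, pointwise
    obtain ⟨hAlen, hAget⟩ := pvFoldSet_getD (pvFillRow w) (List.range' 1 (h - 2)) grid
      List.nodup_range'
    have hA : transform grid = (List.range' 1 (h - 2)).foldl
        (fun out i => out.set i (pvFillRow w (out.getD i []))) grid := by
      rw [transform]
      simp only [hgrid]
      rw [if_neg (by simpa [← hgrid, ← hlen] using hh)]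
      rfl
    have hAlenT : (transform grid).length = h := by rw [hA, hAlen, hlen]
    have hBlen : (transform_alt grid).length = h := by
      rw [hB, List.length_map, List.length_zipIdx]
    apply List.ext_getElem?
    intro k
    have some_getD : ∀ (l : List (List Int)), k < l.length → l[k]? = some (l.getD k []) := by
      intro l hkk
      rw [List.getElem?_eq_getElem hkk, List.getD_eq_getElem l [] hkk]
    by_cases hk : k < h
    · rw [some_getD _ (by rw [hAlenT]; exact hk), some_getD _ (by rw [hBlen]; exact hk)]
      apply congrArg
      have hk1 : k < grid.length := by rw [← hlen]; exact hk
      have hkz : k < grid.zipIdx.length := by rw [List.length_zipIdx]; exact hk1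
      have hBk : (grid.zipIdx.map
          (fun p => if 0 < p.2 ∧ p.2 < h - 1 then pvScanRow w p.1 else p.1)).getD k [] =
          (if 0 < k ∧ k < h - 1 then pvScanRow w (grid.getD k []) else grid.getD k []) := by
        rw [List.getD_eq_getElem _ [] (by rw [List.length_map]; exact hkz),
          List.getD_eq_getElem grid [] hk1]
        simp [List.getElem_zipIdx]
      rw [hA, hAget k, hB, hBk]
      have hmem : k ∈ List.range' 1 (h - 2) ↔ 1 ≤ k ∧ k < 1 + (h - 2) := List.mem_range'_1
      by_cases hint : 0 < k ∧ k < h - 1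
      · have hin : k ∈ List.range' 1 (h - 2) := hmem.mpr (by omega)
        rw [if_pos ⟨hin, hk1⟩, if_pos hint, pvRow_eq]
      · have hout : k ∉ List.range' 1 (h - 2) := fun hc => hint (by have := hmem.mp hc; omega)
        rw [if_neg (fun hc => hout hc.1), if_neg hint]
    · rw [List.getElem?_eq_none (by rw [hAlenT]; omega),
        List.getElem?_eq_none (by rw [hBlen]; omega)]
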